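-- pv_equiv track=rewrite | github.com/bobcaoge/my-code | python/leetcode/402_Remove_K_Digits.py | manage
-- ===== SOURCE A (Python) =====
-- def manage(cur, ret, k):
--     if not ret:
--         return cur, 0
--     length = len(ret)
--     i = 0
--     pos = length
--
--     index = length-i-1
--     while k > 0 and 0 <= index < length:
--         if ret[index] > cur:
--             k -= 1
--             pos = index
--         i += 1
--         index = length-i-1
--     return ret[:pos] + cur, length-pos
-- ===== SOURCE B (Python) =====
-- def manage(cur, ret, k):
--     n = len(ret)
--     matches = [i for i in range(n) if ret[i] > cur]
--     if k > 0 and matches: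
--         pos = matches[max(0, len(matches) - k)]
--     else:
--         pos = n
--     return ret[:pos] + cur, n - pos
-- ===== Notes on version B (the rewrite author's own statement) =====
-- stated objective: alternative
-- what changed: Replaces A's stateful decrementing right-to-left while-loop with a single left-to-right pass that materialises the list of match positions and selects the cut point by one arithmetic index (matches[max(0, len(matches)-k)]).
import Mathlib
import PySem

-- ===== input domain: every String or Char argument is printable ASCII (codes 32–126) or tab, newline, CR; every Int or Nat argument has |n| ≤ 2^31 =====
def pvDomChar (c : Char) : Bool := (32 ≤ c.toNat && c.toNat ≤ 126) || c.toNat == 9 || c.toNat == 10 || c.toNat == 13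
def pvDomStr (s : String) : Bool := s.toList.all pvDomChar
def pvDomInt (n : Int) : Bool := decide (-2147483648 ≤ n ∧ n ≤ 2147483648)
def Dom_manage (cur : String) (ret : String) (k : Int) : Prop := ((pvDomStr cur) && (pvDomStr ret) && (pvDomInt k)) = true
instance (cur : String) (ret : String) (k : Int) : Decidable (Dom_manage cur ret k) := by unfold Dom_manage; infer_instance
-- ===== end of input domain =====

-- B replaces A's decrementing right-to-left scan with one left-to-right pass that
-- materialises the match positions and picks the answer by arithmetic index (objective: alternative).

-- ===== PORT A =====
-- the while loop of A: state (k, i, pos), index recomputed each turn as length-i-1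
def manageLoop (curL sL : List Char) (n : Nat) (k : Int) (i : Nat) (pos : Int) : Int :=
  let index : Int := (n : Int) - i - 1
  if h : k > 0 ∧ 0 ≤ index ∧ index < (n : Int) then
    if curL < [PySem.List.pyGetD sL index ' '] then
      manageLoop curL sL n (k - 1) (i + 1) index
    else
      manageLoop curL sL n k (i + 1) pos
  else pos
termination_by n - i
decreasing_by all_goals omega

def manage (cur : String) (ret : String) (k : Int) : String × Int :=
  if ret.toList = [] then (cur, 0)
  else
    let n := ret.toList.length
    let pos := manageLoop cur.toList ret.toList n k 0 (n : Int)
    (String.ofList (PySem.List.slice ret.toList none (some pos) ++ cur.toList), (n : Int) - pos)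

-- ===== PORT B =====
def manage_alt (cur : String) (ret : String) (k : Int) : String × Int :=
  let s := ret.toList
  let n := s.length
  let ms := (PySem.List.pyRange 0 (n : Int) 1).filterMap
    (fun i => if cur.toList < [PySem.List.pyGetD s i ' '] then some i else none)
  let pos : Int :=
    if k > 0 ∧ ms ≠ [] then
      PySem.List.pyGetD ms (max 0 ((ms.length : Int) - k)) 0
    else (n : Int)
  (String.ofList (PySem.List.slice s none (some pos) ++ cur.toList), (n : Int) - pos)

-- ===== PRECONDITION & SPEC =====
def Spec_manage (cur : String) (ret : String) (k : Int) (out : String × Int) : Prop := out = manage_alt cur ret k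
instance (cur : String) (ret : String) (k : Int) (out : String × Int) : Decidable (Spec_manage cur ret k out) := by unfold Spec_manage; infer_instance

-- ===== CLAIM (what is proved, stated in full; the proofs are below) =====
def Claim_equal_manage : Prop := ∀ (cur : String) (ret : String) (k : Int), Dom_manage cur ret k → Spec_manage cur ret k (manage cur ret k)

-- ===== LEMMAS AND PROOFS =====

-- match positions among indices [0, j), ascending
def Pm (curL sL : List Char) : Nat → List Nat
  | 0 => []
  | j + 1 => Pm curL sL j ++ (if curL < [sL.getD j ' '] then [j] else [])

-- closed form of A's loop: it returns the k-th match position counted from the right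
-- (the leftmost match if there are fewer than k), or n when k ≤ 0 or there is no match.
theorem manageLoop_closed (curL sL : List Char) (n : Nat) :
    ∀ (j : Nat) (k pos : Int), j ≤ n →
      manageLoop curL sL n k (n - j) pos =
        if k ≤ 0 ∨ Pm curL sL j = [] then pos
        else (((Pm curL sL j).getD ((Pm curL sL j).length - k.toNat) 0 : Nat) : Int) := by
  intro j
  induction j with
  | zero =>
    intro k pos _
    rw [manageLoop]
    simp [Pm]
  | succ j ih =>
    intro k pos hj
    rw [manageLoop]
    have hidx : ((n : Int) - (n - (j + 1) : Nat) - 1) = (j : Int) := by omega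
    rw [hidx]
    by_cases hk : k > 0
    · have hcond : k > 0 ∧ 0 ≤ (j : Int) ∧ (j : Int) < (n : Int) := ⟨hk, by omega, by omega⟩
      rw [dif_pos hcond]
      have hget : PySem.List.pyGetD sL (j : Int) ' ' = sL.getD j ' ' :=
        PySem.List.pyGetD_natCast sL j ' '
      have hsucc : n - (j + 1) + 1 = n - j := by omega
      by_cases hm : curL < [sL.getD j ' ']
      · rw [if_pos (by rw [hget]; exact hm)]
        rw [hsucc, ih (k - 1) (j : Int) (by omega)]
        simp only [Pm, if_pos hm]
        by_cases hk1 : k - 1 ≤ 0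
        · -- k = 1: the answer is the rightmost match, namely j
          rw [if_pos (Or.inl hk1)]
          rw [if_neg (by rw [not_or]; exact ⟨by omega, by simp⟩)]
          have hk1' : k.toNat = 1 := by omega
          have : (Pm curL sL j ++ [j]).getD ((Pm curL sL j ++ [j]).length - k.toNat) 0 = j := by
            rw [hk1']
            simp [List.getD_eq_getElem?_getD]
          rw [this]
        · by_cases hP : Pm curL sL j = []
          · rw [if_pos (Or.inr hP)]
            rw [if_neg (by rw [not_or]; exact ⟨by omega, by simp⟩)]
            have : (Pm curL sL j ++ [j]).getD ((Pm curL sL j ++ [j]).length - k.toNat) 0 = j := by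
              rw [hP]
              have h0 : (([] : List Nat) ++ [j]).length - k.toNat = 0 := by simp; omega
              rw [h0]
              rfl
            rw [this]
          · rw [if_neg (by rw [not_or]; exact ⟨by omega, hP⟩)]
            rw [if_neg (by rw [not_or]; exact ⟨by omega, by simp⟩)]
            have hlen : 0 < (Pm curL sL j).length := List.length_pos_iff.mpr hP
            have hidx2 : (Pm curL sL j ++ [j]).length - k.toNat
                = (Pm curL sL j).length - (k - 1).toNat := by
              simp only [List.length_append, List.length_cons, List.length_nil]
              omega
            rw [hidx2]
            have hlt : (Pm curL sL j).length - (k - 1).toNat < (Pm curL sL j).length := by omega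
            rw [List.getD_append _ _ _ _ hlt]
      · rw [if_neg (by rw [hget]; exact hm)]
        rw [hsucc, ih k pos (by omega)]
        simp only [Pm, if_neg hm, List.append_nil]
    · rw [dif_neg (by rw [not_and_or]; exact Or.inl (by omega))]
      rw [if_pos (Or.inl (by omega))]

-- B's one-pass comprehension builds exactly the match-position list Pm
theorem matches_eq (curL sL : List Char) :
    ∀ (j : Nat),
      (PySem.List.pyRange 0 (j : Int) 1).filterMap
        (fun i => if curL < [PySem.List.pyGetD sL i ' '] then some i else none)
      = (Pm curL sL j).map (fun m : Nat => (m : Int)) := by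
  intro j
  induction j with
  | zero =>
    rw [PySem.List.pyRange_one_eq_nil (by omega)]
    simp [Pm]
  | succ j ih =>
    have hsplit : PySem.List.pyRange 0 ((j + 1 : Nat) : Int) 1
        = PySem.List.pyRange 0 (j : Int) 1 ++ PySem.List.pyRange (j : Int) ((j + 1 : Nat) : Int) 1 :=
      PySem.List.pyRange_one_append 0 (j : Int) ((j + 1 : Nat) : Int) (by omega) (by omega)
    have hsing : PySem.List.pyRange (j : Int) ((j + 1 : Nat) : Int) 1 = [(j : Int)] := by
      rw [PySem.List.pyRange_one_cons (by omega)]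
      rw [PySem.List.pyRange_one_eq_nil (by omega)]
    rw [hsplit, hsing, List.filterMap_append, ih]
    rw [List.filterMap_cons]
    show _ = (Pm curL sL (j + 1)).map _
    simp only [Pm, List.map_append, PySem.List.pyGetD_natCast]
    by_cases hm : curL < [sL.getD j ' ']
    · rw [if_pos hm, if_pos hm]
      simp
    · rw [if_neg hm, if_neg hm]
      simp

-- the two position computations agree
theorem pos_eq (curL sL : List Char) (k : Int) :
    manageLoop curL sL sL.length k 0 (sL.length : Int) =
      (if k > 0 ∧ (Pm curL sL sL.length).map (fun m : Nat => (m : Int)) ≠ [] then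
        PySem.List.pyGetD ((Pm curL sL sL.length).map (fun m : Nat => (m : Int)))
          (max 0 ((((Pm curL sL sL.length).map (fun m : Nat => (m : Int))).length : Int) - k)) 0
      else (sL.length : Int)) := by
  have hmain := manageLoop_closed curL sL sL.length sL.length k (sL.length : Int) le_rfl
  rw [Nat.sub_self] at hmain
  rw [hmain]
  set P := Pm curL sL sL.length with hPdef
  simp only [List.length_map, ne_eq, List.map_eq_nil_iff]
  by_cases hk : k ≤ 0
  · rw [if_pos (Or.inl hk), if_neg (fun h => absurd h.1 (by omega))]
  · by_cases hE : P = []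
    · rw [if_pos (Or.inr hE), if_neg (fun h => h.2 hE)]
    · rw [if_neg (by rw [not_or]; exact ⟨hk, hE⟩), if_pos ⟨by omega, hE⟩]
      have hlen : 0 < P.length := List.length_pos_iff.mpr hE
      have h0 : (0 : Int) ≤ max 0 ((P.length : Int) - k) := le_max_left _ _
      have h1 : max 0 ((P.length : Int) - k) < ((P.map (fun m : Nat => (m : Int))).length : Int) := by
        simp only [List.length_map]
        omega
      rw [PySem.List.pyGetD_eq_getElem _ _ h0 h1]
      have h2 : (max 0 ((P.length : Int) - k)).toNat = P.length - k.toNat := by omega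
      simp only [List.getElem_map, h2]
      rw [List.getD_eq_getElem _ _ (by omega)]

-- ===== VERDICT (by name: the statement is the Claim_ definition above) =====
theorem manage_spec : Claim_equal_manage := by
  intro cur ret k _
  unfold Spec_manage manage manage_alt
  by_cases hE : ret.toList = []
  · rw [if_pos hE]
    simp [hE, PySem.List.pyRange_one_eq_nil, PySem.List.slice]
  · rw [if_neg hE]
    simp only [matches_eq, pos_eq]
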